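-- pv_equiv track=rewrite | github.com/ALiljekvist/AoC2025 | day3/main.py | find_max_parts
-- ===== SOURCE A (Python) =====
-- def find_max_parts(s, size=2):
--     maxes = [0 for i in range(size)]
--     for i, v in enumerate(s):
--         vi = int(v)
--         placed = False
--         for j in range(size):
--             if placed:
--                 continue
--             if vi > maxes[j] and i < len(s)-size+j+1:
--                 maxes[j] = vi
--                 for k in range(j+1, size):
--                     maxes[k] = 0
--                 placed = True
--     return maxes
-- ===== SOURCE B (Python) =====
-- def find_max_parts(s, size=2):
--     n = len(s)
--     res = []
--     start = 0
--     for j in range(size):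
--         end = n - size + j + 1
--         best = 0
--         for i in range(start, end):
--             vi = int(s[i])
--             if vi > best:
--                 best = vi
--                 start = i + 1
--         res.append(best)
--     return res
-- ===== Notes on version B (the rewrite author's own statement) =====
-- stated objective: alternative
-- what changed: A makes one pass over s, scanning all slots for each element and zeroing all later slots on every placement; B instead computes each slot directly as the running maximum (above 0) of its index window s[start:n-size+j+1], advancing the start pointer past each strict improvement, with no placed flag and no resets.
import Mathlib
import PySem

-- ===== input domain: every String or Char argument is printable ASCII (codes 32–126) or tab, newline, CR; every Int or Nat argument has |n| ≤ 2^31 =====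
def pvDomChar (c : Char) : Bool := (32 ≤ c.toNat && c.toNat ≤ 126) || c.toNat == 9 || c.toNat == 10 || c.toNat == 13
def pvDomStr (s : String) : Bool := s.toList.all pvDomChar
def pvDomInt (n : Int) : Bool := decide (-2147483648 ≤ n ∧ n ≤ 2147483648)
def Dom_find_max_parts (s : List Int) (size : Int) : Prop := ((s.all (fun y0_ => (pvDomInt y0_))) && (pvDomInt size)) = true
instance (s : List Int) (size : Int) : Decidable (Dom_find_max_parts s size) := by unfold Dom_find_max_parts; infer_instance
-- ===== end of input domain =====

-- B replaces A's single pass (which checks every slot per element and zeroes later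
-- slots on each placement) by a per-slot window-maximum scan with an advancing start
-- pointer (alternative algorithm; same return value).

-- ===== PORT A =====
-- literal transliteration of A: maxes list, one pass over enumerate(s), inner scan
-- over slots with a 'placed' flag, reset loop zeroing later slots.
-- maxes[j] reads/writes use pyGetD/pySetD: j ∈ range(size) is always in range, so they are exact.
def find_max_parts (s : List Int) (size : Int) : List Int :=
  let maxes : List Int := (PySem.List.pyRange 0 size 1).map (fun _ => (0 : Int))
  (PySem.List.enumerate s).foldl (fun maxes iv =>
    let i := iv.1
    let vi := iv.2
    let res := (PySem.List.pyRange 0 size 1).foldl (fun (st : List Int × Bool) j =>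
      if st.2 then st
      else if vi > PySem.List.pyGetD st.1 j 0 ∧ i < (s.length : Int) - size + j + 1 then
        let m1 := PySem.List.pySetD st.1 j vi
        let m2 := (PySem.List.pyRange (j + 1) size 1).foldl
          (fun m k => PySem.List.pySetD m k 0) m1
        (m2, true)
      else st) (maxes, false)
    res.1) maxes

-- ===== PORT B =====
-- literal transliteration of B (Source B): for each slot j, scan s[start:n-size+j+1]
-- for the running maximum (> 0), moving start past each strict improvement.
-- s[i] uses pyGetD: 0 ≤ start ≤ i < n-size+j+1 ≤ n, so it is exact.
def find_max_parts_alt (s : List Int) (size : Int) : List Int :=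
  let n : Int := s.length
  ((PySem.List.pyRange 0 size 1).foldl (fun (st : List Int × Int) j =>
    let e := n - size + j + 1
    let bs := (PySem.List.pyRange st.2 e 1).foldl (fun (bs : Int × Int) i =>
      let vi := PySem.List.pyGetD s i 0
      if vi > bs.1 then (vi, i + 1) else bs) ((0 : Int), st.2)
    (st.1 ++ [bs.1], bs.2)) ([], 0)).1

-- ===== PRECONDITION & SPEC =====
def Spec_find_max_parts (s : List Int) (size : Int) (out : List Int) : Prop := out = find_max_parts_alt s size
instance (s : List Int) (size : Int) (out : List Int) : Decidable (Spec_find_max_parts s size out) := by unfold Spec_find_max_parts; infer_instance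

-- ===== CLAIM (what is proved, stated in full; the proofs are below) =====
def Claim_equal_find_max_parts : Prop := ∀ (s : List Int) (size : Int), Dom_find_max_parts s size → Spec_find_max_parts s size (find_max_parts s size)

-- ===== LEMMAS AND PROOFS =====

-- window scan: B's inner loop, named for the proofs
def scanW (s : List Int) (start e : Int) : Int × Int :=
  (PySem.List.pyRange start e 1).foldl (fun (bs : Int × Int) i =>
    let vi := PySem.List.pyGetD s i 0
    if vi > bs.1 then (vi, i + 1) else bs) ((0 : Int), start)

-- B's slot step, named (definitionally the step of find_max_parts_alt's outer fold)
def slotB (s : List Int) (size : Int) (st : List Int × Int) (j : Int) : List Int × Int :=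
  let e := (s.length : Int) - size + j + 1
  let bs := (PySem.List.pyRange st.2 e 1).foldl (fun (bs : Int × Int) i =>
    let vi := PySem.List.pyGetD s i 0
    if vi > bs.1 then (vi, i + 1) else bs) ((0 : Int), st.2)
  (st.1 ++ [bs.1], bs.2)

-- A's slot step, named (definitionally the step of find_max_parts' inner fold)
def slotA (s : List Int) (size vi i : Int) (st : List Int × Bool) (j : Int) : List Int × Bool :=
  if st.2 then st
  else if vi > PySem.List.pyGetD st.1 j 0 ∧ i < (s.length : Int) - size + j + 1 then
    let m1 := PySem.List.pySetD st.1 j vi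
    let m2 := (PySem.List.pyRange (j + 1) size 1).foldl
      (fun m k => PySem.List.pySetD m k 0) m1
    (m2, true)
  else st

-- B as a structural recursion over the remaining number of slots k
def gB (s : List Int) (size : Int) : ℕ → Int → Int → List Int
  | 0, _, _ => []
  | k + 1, j, start =>
    let bs := scanW s start ((s.length : Int) - size + j + 1)
    bs.1 :: gB s size k (j + 1) bs.2

-- B with every window clamped at time t: the state of A after processing s[0:t]
def gC (s : List Int) (size t : Int) : ℕ → Int → Int → List Int
  | 0, _, _ => []
  | k + 1, j, start =>
    let bs := scanW s start (min ((s.length : Int) - size + j + 1) t)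
    bs.1 :: gC s size t k (j + 1) bs.2

-- A's inner slot loop as a structural recursion over the maxes list
def place (vi i n size : Int) : Int → List Int → List Int
  | _, [] => []
  | j, m :: ms =>
    if vi > m ∧ i < n - size + j + 1 then vi :: ms.map (fun _ => 0)
    else m :: place vi i n size (j + 1) ms

lemma length_gC (s : List Int) (size t : Int) : ∀ (k : ℕ) (j start : Int),
    (gC s size t k j start).length = k := by
  intro k
  induction k with
  | zero => intro j start; rfl
  | succ k ih => intro j start; simp [gC, ih]

lemma zeros_eq (size : Int) :
    (PySem.List.pyRange 0 size 1).map (fun _ => (0 : Int)) = List.replicate size.toNat 0 := by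
  rw [PySem.List.pyRange_one]
  simp [Function.comp_def, List.map_const']

-- scanW facts
lemma scanW_empty (s : List Int) (start e : Int) (h : e ≤ start) :
    scanW s start e = (0, start) := by
  simp [scanW, PySem.List.pyRange_one_eq_nil h]

lemma scanW_snoc (s : List Int) (start e : Int) (h : start ≤ e) :
    scanW s start (e + 1) =
      (let bs := scanW s start e
       if PySem.List.pyGetD s e 0 > bs.1 then (PySem.List.pyGetD s e 0, e + 1) else bs) := by
  unfold scanW
  rw [PySem.List.pyRange_one_succ_right h, List.foldl_append]
  rfl

lemma scanW_fold_snd (s : List Int) : ∀ (k : ℕ) (a e : Int) (bp : Int × Int), (e - a).toNat = k →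
    ((PySem.List.pyRange a e 1).foldl (fun (bs : Int × Int) i =>
      let vi := PySem.List.pyGetD s i 0
      if vi > bs.1 then (vi, i + 1) else bs) bp).2 = bp.2 ∨
    ((PySem.List.pyRange a e 1).foldl (fun (bs : Int × Int) i =>
      let vi := PySem.List.pyGetD s i 0
      if vi > bs.1 then (vi, i + 1) else bs) bp).2 ≤ e := by
  intro k
  induction k with
  | zero =>
    intro a e bp h
    rw [PySem.List.pyRange_one_eq_nil (by omega)]
    left; rfl
  | succ k ih =>
    intro a e bp h
    rw [PySem.List.pyRange_one_cons (by omega)]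
    simp only [List.foldl_cons]
    by_cases hc : PySem.List.pyGetD s a 0 > bp.1
    · simp only [hc, if_pos]
      rcases ih (a + 1) e (PySem.List.pyGetD s a 0, a + 1) (by omega) with h' | h'
      · right; rw [h']; omega
      · right; exact h'
    · simp only [hc, if_false]
      exact ih (a + 1) e bp (by omega)

lemma scanW_snd (s : List Int) (start e : Int) :
    (scanW s start e).2 = start ∨ (scanW s start e).2 ≤ e :=
  scanW_fold_snd s (e - start).toNat start e (0, start) rfl

-- clamped windows that already start past the clamp are all empty
lemma gC_zero (s : List Int) (size t : Int) : ∀ (k : ℕ) (j start : Int), t ≤ start →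
    gC s size t k j start = List.replicate k 0 := by
  intro k
  induction k with
  | zero => intro j start _; rfl
  | succ k ih =>
    intro j start h
    have he : min ((s.length : Int) - size + j + 1) t ≤ start := by omega
    simp [gC, scanW_empty s start _ he, ih _ _ h, List.replicate_succ]

-- core step lemma: feeding element t into A's state update is exactly extending the clamp
lemma place_gC (s : List Int) (size t : Int) :
    ∀ (k : ℕ) (j start : Int), start ≤ t →
    place (PySem.List.pyGetD s t 0) t (s.length : Int) size j (gC s size t k j start) =
      gC s size (t + 1) k j start := by
  intro k
  induction k with
  | zero => intro j start _; rfl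
  | succ k ih =>
    intro j start hst
    set v := PySem.List.pyGetD s t 0 with hv
    by_cases he : (s.length : Int) - size + j + 1 ≤ t
    · -- element t is past slot j's window: same scan on both sides
      have h1 : min ((s.length : Int) - size + j + 1) t = (s.length : Int) - size + j + 1 := by omega
      have h2 : ¬ (v > (scanW s start ((s.length : Int) - size + j + 1)).1 ∧
          t < (s.length : Int) - size + j + 1) := by omega
      simp only [gC, h1, min_eq_left (by omega : (s.length : Int) - size + j + 1 ≤ t + 1)]
      rw [place, if_neg h2]
      refine congrArg _ (ih (j + 1) _ ?_)
      rcases scanW_snd s start ((s.length : Int) - size + j + 1) with h' | h' <;> omega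
    · -- element t lies in slot j's clamped window
      have h1 : min ((s.length : Int) - size + j + 1) t = t := by omega
      have h2 : min ((s.length : Int) - size + j + 1) (t + 1) = t + 1 := by omega
      simp only [gC, h1, h2]
      rw [show (t + 1 : Int) = t + 1 from rfl, scanW_snoc s start t hst]
      by_cases hc : v > (scanW s start t).1
      · -- v is a new maximum: A resets the tail, B's later windows are empty
        rw [place, if_pos ⟨hc, by omega⟩]
        simp only [← hv, hc, if_pos]
        rw [gC_zero s size (t + 1) k (j + 1) (t + 1) le_rfl]
        refine congrArg _ ?_
        have hlen := length_gC s size t k (j + 1) (scanW s start t).2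
        rw [List.map_const', hlen]
      · -- v does not beat slot j: both sides keep slot j and recurse
        rw [place, if_neg (fun hx => hc hx.1)]
        simp only [← hv, hc, if_false]
        refine congrArg _ (ih (j + 1) _ ?_)
        rcases scanW_snd s start t with h' | h' <;> omega

-- pySetD in the middle of an append
lemma setD_append (pre ms : List Int) (m v : Int) :
    PySem.List.pySetD (pre ++ m :: ms) (pre.length : Int) v = pre ++ v :: ms := by
  rw [PySem.List.pySetD_natCast]
  simp

lemma getD_append (pre ms : List Int) (m : Int) :
    PySem.List.pyGetD (pre ++ m :: ms) (pre.length : Int) 0 = m := by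
  rw [PySem.List.pyGetD_natCast]
  simp [List.getD_eq_getElem?_getD]

-- A's reset loop zeroes the tail of maxes
lemma reset_fold (size : Int) : ∀ (suf pre : List Int), pre.length + suf.length = size.toNat →
    (PySem.List.pyRange (pre.length : Int) size 1).foldl
      (fun m k => PySem.List.pySetD m k 0) (pre ++ suf) = pre ++ suf.map (fun _ => 0) := by
  intro suf
  induction suf with
  | nil =>
    intro pre h
    simp only [List.length_nil, Nat.add_zero] at h
    rw [PySem.List.pyRange_one_eq_nil (show size ≤ ((pre.length : ℕ) : Int) by omega)]
    simp
  | cons a suf ih =>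
    intro pre h
    simp only [List.length_cons] at h
    rw [PySem.List.pyRange_one_cons (show ((pre.length : ℕ) : Int) < size by omega),
      List.foldl_cons, setD_append]
    have := ih (pre ++ [(0 : Int)]) (by simp; omega)
    simp only [List.length_append, List.length_cons, List.length_nil, Nat.cast_add, zero_add,
      Nat.cast_one, List.append_assoc, List.cons_append, List.nil_append] at this ⊢
    simpa using this

-- once placed, the slot loop does nothing
lemma slotA_placed (s : List Int) (size vi i : Int) (l : List Int) :
    ∀ (r : List Int), r.foldl (slotA s size vi i) (l, true) = (l, true) := by
  intro r
  induction r with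
  | nil => rfl
  | cons x r ih => rw [List.foldl_cons]; exact ih

-- A's inner fold equals place
lemma inner_eq_place (s : List Int) (size vi i : Int) :
    ∀ (suf pre : List Int), pre.length + suf.length = size.toNat →
    ∃ b, (PySem.List.pyRange (pre.length : Int) size 1).foldl (slotA s size vi i)
        (pre ++ suf, false) =
      (pre ++ place vi i (s.length : Int) size (pre.length : Int) suf, b) := by
  intro suf
  induction suf with
  | nil =>
    intro pre h
    simp only [List.length_nil, Nat.add_zero] at h
    rw [PySem.List.pyRange_one_eq_nil (show size ≤ ((pre.length : ℕ) : Int) by omega)]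
    exact ⟨false, by simp [place]⟩
  | cons m ms ih =>
    intro pre h
    simp only [List.length_cons] at h
    rw [PySem.List.pyRange_one_cons (show ((pre.length : ℕ) : Int) < size by omega),
      List.foldl_cons]
    by_cases hc : vi > m ∧ i < (s.length : Int) - size + (pre.length : Int) + 1
    · -- place here: set slot, zero the tail, flag placed
      refine ⟨true, ?_⟩
      have hstep : slotA s size vi i (pre ++ m :: ms, false) ((pre.length : ℕ) : Int) =
          (pre ++ vi :: ms.map (fun _ => 0), true) := by
        unfold slotA
        simp only [Bool.false_eq_true, if_false]
        rw [if_pos (by rw [getD_append]; exact hc), setD_append]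
        have hr := reset_fold size ms (pre ++ [vi]) (by simp; omega)
        simp only [List.length_append, List.length_cons, List.length_nil, Nat.cast_add, zero_add,
          Nat.cast_one, List.append_assoc, List.cons_append, List.nil_append] at hr
        rw [hr]
      rw [hstep, slotA_placed, place, if_pos hc]
    · -- skip this slot, recurse
      have hstep : slotA s size vi i (pre ++ m :: ms, false) ((pre.length : ℕ) : Int) =
          (pre ++ m :: ms, false) := by
        unfold slotA
        simp only [Bool.false_eq_true, if_false]
        rw [if_neg (by rw [getD_append]; exact hc)]
      rw [hstep]
      obtain ⟨b, hb⟩ := ih (pre ++ [m]) (by simp; omega)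
      refine ⟨b, ?_⟩
      simp only [List.length_append, List.length_cons, List.length_nil, Nat.cast_add, zero_add,
        Nat.cast_one, List.append_assoc, List.cons_append, List.nil_append] at hb
      rw [hb, place, if_neg hc]

-- A's whole pass over s[0:t] lands exactly on the clamped-window state
lemma A_fold_take (s : List Int) (size : Int) : ∀ (t : ℕ), t ≤ s.length →
    (PySem.List.enumerate (s.take t)).foldl (fun m iv =>
        ((PySem.List.pyRange 0 size 1).foldl (slotA s size iv.2 iv.1) (m, false)).1)
      (List.replicate size.toNat 0) = gC s size (t : Int) size.toNat 0 0 := by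
  intro t
  induction t with
  | zero =>
    intro _
    rw [Nat.cast_zero, gC_zero s size 0 size.toNat 0 0 le_rfl]
    rfl
  | succ t ih =>
    intro ht
    have htl : t < s.length := by omega
    rw [List.take_add_one, List.getElem?_eq_getElem htl]
    simp only [Option.toList_some, PySem.List.enumerate_append, List.foldl_append]
    rw [ih (by omega)]
    have hlen : (s.take t).length = t := by rw [List.length_take]; omega
    have henum : PySem.List.enumerate [s[t]] (0 + (s.take t).length) = [((t : Int), s[t])] := by
      rw [PySem.List.enumerate_cons, PySem.List.enumerate_nil, hlen]
      norm_num
    rw [henum, List.foldl_cons, List.foldl_nil]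
    obtain ⟨b, hb⟩ := inner_eq_place s size s[t] (t : Int)
      (gC s size (t : Int) size.toNat 0 0) [] (by simp [length_gC])
    simp only [List.length_nil, Nat.cast_zero, List.nil_append] at hb
    rw [hb]
    have hget : s[t] = PySem.List.pyGetD s ((t : ℕ) : Int) 0 := by
      rw [PySem.List.pyGetD_natCast, List.getD_eq_getElem?_getD, List.getElem?_eq_getElem htl]
      rfl
    rw [hget, place_gC s size (t : Int) size.toNat 0 0 (by omega)]
    norm_num

-- A = clamped B at t = n
lemma A_eq_gC (s : List Int) (size : Int) :
    find_max_parts s size = gC s size (s.length : Int) size.toNat 0 0 := by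
  have h := A_fold_take s size s.length le_rfl
  rw [List.take_length] at h
  rw [← h, ← zeros_eq]
  rfl

lemma gC_eq_gB (s : List Int) (size : Int) :
    ∀ (k : ℕ) (j start : Int), (size - j).toNat = k →
    gC s size (s.length : Int) k j start = gB s size k j start := by
  intro k
  induction k with
  | zero => intro j start _; rfl
  | succ k ih =>
    intro j start h
    have he : (s.length : Int) - size + j + 1 ≤ (s.length : Int) := by omega
    simp only [gC, gB, min_eq_left he]
    rw [ih (j + 1) _ (by omega)]

lemma B_fold_gB (s : List Int) (size : Int) :
    ∀ (k : ℕ) (j : Int) (res : List Int) (start : Int), (size - j).toNat = k →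
    ∃ p, (PySem.List.pyRange j size 1).foldl (slotB s size) (res, start) =
      (res ++ gB s size k j start, p) := by
  intro k
  induction k with
  | zero =>
    intro j res start h
    rw [PySem.List.pyRange_one_eq_nil (by omega)]
    exact ⟨start, by simp [gB]⟩
  | succ k ih =>
    intro j res start h
    rw [PySem.List.pyRange_one_cons (by omega), List.foldl_cons]
    have hstep : slotB s size (res, start) j =
        (res ++ [(scanW s start ((s.length : Int) - size + j + 1)).1],
         (scanW s start ((s.length : Int) - size + j + 1)).2) := rfl
    rw [hstep]
    obtain ⟨p, hp⟩ := ih (j + 1) (res ++ [(scanW s start ((s.length : Int) - size + j + 1)).1])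
      ((scanW s start ((s.length : Int) - size + j + 1)).2) (by omega)
    exact ⟨p, by rw [hp]; simp [gB]⟩

lemma B_eq_gB (s : List Int) (size : Int) :
    find_max_parts_alt s size = gB s size size.toNat 0 0 := by
  obtain ⟨p, hp⟩ := B_fold_gB s size size.toNat 0 [] 0 (by simp)
  have : find_max_parts_alt s size =
      ((PySem.List.pyRange 0 size 1).foldl (slotB s size) ([], 0)).1 := rfl
  rw [this, hp]
  simp

-- ===== VERDICT (by name: the statement is the Claim_ definition above) =====
theorem find_max_parts_spec : Claim_equal_find_max_parts := by
  intro s size _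
  unfold Spec_find_max_parts
  rw [A_eq_gC, B_eq_gB, gC_eq_gB s size size.toNat 0 0 (by simp)]
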